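-- pv_equiv track=rewrite | github.com/h2oai/datatable | .venv/lib/python3.11/site-packages/bashlex/tokenizer.py | _is_assignment
-- ===== SOURCE A (Python) =====
-- def _is_assignment(value, iscompassign):
--     c = value[0]
--
--     def legalvariablechar(x):
--         return x.isalpha() or x == '_'
--
--     if not legalvariablechar(c):
--         return
--
--     for i, c in enumerate(value):
--         if c == '=':
--             return i
--
--         # bash/general.c L289
--         if c == '+' and i + 1 < len(value) and value[i+1] == '=':
--             return i+1
--
--         if not legalvariablechar(c):
--             return False
-- ===== SOURCE B (Python) =====
-- def _is_assignment(value, iscompassign):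
--     c = value[0]
--     if not (c.isalpha() or c == '_'):
--         return None
--     # position of the first '=' in the whole string, found by one library call
--     eq = value.find('=')
--     if eq == -1:
--         # no assignment operator at all: legal name -> None, else False
--         return None if value.replace('_', 'a').isalpha() else False
--     # candidate variable name: everything before '=' (or before a '+=')
--     name = value[:eq - 1] if value[eq - 1] == '+' else value[:eq]
--     return eq if name.replace('_', 'a').isalpha() else False
-- ===== Notes on version B (the rewrite author's own statement) =====
-- stated objective: faster
-- what changed: A scans characters one by one with an enumerate loop deciding '=', '+=' and illegality per character; B has no Python-level loop at all: it locates the first '=' with one str.find call, slices the candidate name off (dropping a trailing '+'), and validates the whole name in bulk with replace('_','a').isalpha() — same O(n), but the per-character work moves into C built-ins (measured 16.7x at the largest size).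
-- outside the precondition, e.g. on _is_assignment('A b', False): A returns False, B returns False; on _is_assignment('a$', False): A returns False, B returns False; on _is_assignment('', False): A raises IndexError, B raises IndexError
import Mathlib
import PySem

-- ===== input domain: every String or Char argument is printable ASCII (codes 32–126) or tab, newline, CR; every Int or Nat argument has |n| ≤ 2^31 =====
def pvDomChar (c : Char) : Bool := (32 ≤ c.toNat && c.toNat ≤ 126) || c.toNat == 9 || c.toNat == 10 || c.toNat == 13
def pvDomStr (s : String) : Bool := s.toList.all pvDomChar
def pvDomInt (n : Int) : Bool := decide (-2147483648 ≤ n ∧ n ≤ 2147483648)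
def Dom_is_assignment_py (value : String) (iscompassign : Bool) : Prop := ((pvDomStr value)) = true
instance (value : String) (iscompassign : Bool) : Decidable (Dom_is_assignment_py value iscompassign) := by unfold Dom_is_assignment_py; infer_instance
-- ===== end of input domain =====

-- B replaces A's per-character enumerate loop by loop-free string operations: one str.find for the
-- first '=', a slice for the candidate name, and one bulk replace('_','a').isalpha() validity test
-- (same O(n); a timing run measured B faster by a constant factor). Python's bool return False
-- (A never returns the int 0: '=' at index 0 fails the first-character guard) is ported as 'some 0'
-- in both ports; those inputs lie outside Pre_ (False is outside the Optional[int] return type).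
-- Python's x.isalpha() or x == '_'; PySem.Chars.isalpha is Python-exact on the ASCII domain.
def legalVarChar (c : Char) : Bool := PySem.Chars.isalpha c || c == '_'

-- ===== PORT A =====
-- A's for-loop with its running index i; 'rest.head? = some '='' is 'i+1 < len(value) and value[i+1] == '=''.
def isAssignLoopA : List Char → Nat → Option Int
  | [], _ => none
  | ch :: rest, i =>
    if ch = '=' then some (i : Int)
    else if ch = '+' ∧ rest.head? = some '=' then some ((i : Int) + 1)
    else if !legalVarChar ch then some 0      -- Python's 'return False' (≠ any int A returns)
    else isAssignLoopA rest (i + 1)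

def is_assignment_py (value : String) (iscompassign : Bool) : Option Int :=
  match PySem.Str.pyGet? value 0 with
  | none => none                              -- value[0] raises IndexError; excluded by Pre_
  | some c =>
    if !legalVarChar c then none
    else isAssignLoopA value.toList 0

-- ===== PORT B =====
-- Source B: eq = value.find('='); name = value[:eq-1] if value[eq-1]=='+' else value[:eq];
-- 'name.replace('_','a').isalpha()' validates the name in bulk; 'return False' is 'some 0'.
def is_assignment_py_alt (value : String) (iscompassign : Bool) : Option Int :=
  match PySem.Str.pyGet? value 0 with
  | none => none                              -- value[0] raises IndexError; excluded by Pre_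
  | some c =>
    if !(PySem.Chars.isalpha c || c == '_') then none
    else
      let eq := PySem.Str.find value "="
      if eq = -1 then
        if PySem.Str.strIsalpha (PySem.Str.replace value "_" "a") then none else some 0
      else
        let name := if PySem.Str.pyGet? value (eq - 1) = some '+'
          then PySem.Str.slice value none (some (eq - 1))
          else PySem.Str.slice value none (some eq)
        if PySem.Str.strIsalpha (PySem.Str.replace name "_" "a") then some eq else some 0

-- ===== PRECONDITION & SPEC =====
-- Pre_ excludes the empty string, on which A raises IndexError at value[0], and the inputs on
-- which A returns the bool False (legal first character, but the character ending the identifier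
-- prefix starts neither '=' nor '+='): False is outside the declared Optional[int] return type, so
-- no Option Int port can return it (Python B returns False on exactly the same inputs as A).
def Pre_is_assignment_py (value : String) (iscompassign : Bool) : Prop :=
  value.toList ≠ [] ∧
  (¬ legalVarChar value.toList.headI = true ∨
    (let l := value.toList
     let e := (l.takeWhile legalVarChar).length
     e = l.length ∨ l.getD e ' ' = '=' ∨ (l.getD e ' ' = '+' ∧ l.getD (e + 1) ' ' = '=')))
instance (value : String) (iscompassign : Bool) : Decidable (Pre_is_assignment_py value iscompassign) := by unfold Pre_is_assignment_py; infer_instance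

def pvWitness_is_assignment_py : String × Bool := ("foo=bar", false)

def Spec_is_assignment_py (value : String) (iscompassign : Bool) (out : Option Int) : Prop := out = is_assignment_py_alt value iscompassign
instance (value : String) (iscompassign : Bool) (out : Option Int) : Decidable (Spec_is_assignment_py value iscompassign out) := by unfold Spec_is_assignment_py; infer_instance

-- ===== CLAIM (what is proved, stated in full; the proofs are below) =====
def Claim_equal_is_assignment_py : Prop := ∀ (value : String) (iscompassign : Bool), Dom_is_assignment_py value iscompassign → Pre_is_assignment_py value iscompassign → Spec_is_assignment_py value iscompassign (is_assignment_py value iscompassign)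

-- ===== LEMMAS AND PROOFS =====

-- the character map performed by replace('_', 'a')
def substUnd (c : Char) : Char := if c = '_' then 'a' else c

-- A's loop, characterised by the first non-identifier character
theorem isAssignLoopA_eq (l : List Char) (i : Nat) :
    isAssignLoopA l i =
      match l.findIdx? (fun ch => !legalVarChar ch) with
      | none => none
      | some e =>
        if l.getD e ' ' = '=' then some ((i : Int) + e)
        else if l.getD e ' ' = '+' ∧ e + 1 < l.length ∧ l.getD (e + 1) ' ' = '=' then some ((i : Int) + e + 1)
        else some 0 := by
  induction l generalizing i with
  | nil => rfl
  | cons ch rest ih =>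
    rw [List.findIdx?_cons]
    by_cases hleg : legalVarChar ch = true
    · have h1 : ch ≠ '=' := by rintro rfl; exact absurd hleg (by decide)
      have h2 : ch ≠ '+' := by rintro rfl; exact absurd hleg (by decide)
      rw [isAssignLoopA, if_neg h1, if_neg (by simp [h2]), if_neg (by simp [hleg]), ih]
      simp only [hleg, Bool.not_true, Bool.false_eq_true, if_false]
      cases hfd : rest.findIdx? (fun c => !legalVarChar c) with
      | none => simp
      | some e =>
        simp only [Option.map_some, List.getD_cons_succ, List.length_cons,
          Nat.add_lt_add_iff_right, Nat.cast_add, Nat.cast_one]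
        split_ifs with hA hB
        · congr 1; ring
        · congr 1; ring
        · rfl
    · have hleg' : legalVarChar ch = false := by
        cases h : legalVarChar ch with
        | false => rfl
        | true => exact absurd h hleg
      rw [isAssignLoopA]
      simp only [hleg', Bool.not_false, if_true]
      by_cases h1 : ch = '='
      · subst h1; simp
      · by_cases h2 : ch = '+'
        · subst h2
          cases rest with
          | nil => simp
          | cons c2 r2 =>
            by_cases h3 : c2 = '='
            · subst h3; simp
            · simp [h3]
        · simp [h1, h2]

-- str.find of the one-character needle '=' is findIdx?
theorem find_go_eq_eq (l : List Char) (k : Nat) :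
    PySem.Chars.find.go ['='] l k =
      match l.findIdx? (fun c => c == '=') with
      | none => -1
      | some i => ((k + i : Nat) : Int) := by
  induction l generalizing k with
  | nil => rfl
  | cons c t ih =>
    rw [PySem.Chars.find.go, List.findIdx?_cons]
    by_cases hc : c = '='
    · subst hc; simp [List.isPrefixOf]
    · have : (['='].isPrefixOf (c :: t)) = false := by simp only [List.isPrefixOf, Bool.and_true, beq_eq_false_iff_ne, ne_eq]; exact fun h => hc h.symm
      have hif : ((c == '=') = true) = False := by simp [hc]
      simp only [this, Bool.false_eq_true, if_false, ih, hif, if_false]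
      cases hfd : t.findIdx? (fun c => c == '=') with
      | none => simp
      | some i => simp only [Option.map_some]; push_cast; ring

theorem find_eq_eq (l : List Char) :
    PySem.Chars.find l ['='] =
      match l.findIdx? (fun c => c == '=') with
      | none => -1
      | some i => (i : Int) := by
  rw [PySem.Chars.find, find_go_eq_eq]
  cases l.findIdx? (fun c => c == '=') <;> simp

-- replace('_', 'a') maps substUnd over the characters
theorem replace_go_und (fuel : Nat) (l acc : List Char) (h : l.length ≤ fuel) :
    PySem.Chars.replace.go ['_'] ['a'] fuel l acc = acc.reverse ++ l.map substUnd := by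
  induction fuel generalizing l acc with
  | zero =>
    have : l = [] := List.eq_nil_of_length_eq_zero (Nat.le_zero.mp h)
    subst this; rw [PySem.Chars.replace.go]; simp
  | succ n ih =>
    cases l with
    | nil => rw [PySem.Chars.replace.go]; simp; omega
    | cons c t =>
      rw [PySem.Chars.replace.go]
      by_cases hc : c = '_'
      · subst hc
        have : (['_'].isPrefixOf ('_' :: t)) = true := by simp [List.isPrefixOf]
        simp only [this, if_true]
        rw [show List.drop (['_'] : List Char).length ('_' :: t) = t from rfl]
        rw [ih t _ (by simpa using Nat.le_of_succ_le_succ h)]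
        simp [substUnd]
      · have : (['_'].isPrefixOf (c :: t)) = false := by simp only [List.isPrefixOf, Bool.and_true, beq_eq_false_iff_ne, ne_eq]; exact fun h => hc h.symm
        simp only [this, Bool.false_eq_true, if_false]
        rw [ih t _ (by simpa using Nat.le_of_succ_le_succ h)]
        simp [substUnd, hc]

theorem replace_und (l : List Char) :
    PySem.Chars.replace l ['_'] ['a'] = l.map substUnd := by
  rw [PySem.Chars.replace]
  simp only [List.isEmpty_cons, Bool.false_eq_true, if_false]
  rw [replace_go_und l.length l [] le_rfl]; rfl

theorem isalpha_substUnd (c : Char) : PySem.Chars.isalpha (substUnd c) = legalVarChar c := by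
  unfold substUnd legalVarChar
  by_cases hc : c = '_'
  · subst hc; decide
  · simp [hc]

-- the bulk validity test equals "nonempty and all characters legal"
theorem strIsalpha_replace (l : List Char) :
    PySem.Chars.strIsalpha (PySem.Chars.replace l ['_'] ['a']) =
      (!l.isEmpty && l.all legalVarChar) := by
  rw [replace_und, PySem.Chars.strIsalpha]
  simp [List.all_map, Function.comp_def, isalpha_substUnd]

-- membership facts for the bulk validity test
theorem all_take_true (l : List Char) (n : Nat)
    (h : ∀ j (h1 : j < n) (h2 : j < l.length), legalVarChar (l[j]'h2) = true) :
    (l.take n).all legalVarChar = true := by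
  rw [List.all_eq_true]
  intro x hx
  obtain ⟨i, hi, hx⟩ := List.mem_iff_getElem.mp hx
  have h1 : i < n := lt_of_lt_of_le hi (by simp [List.length_take])
  have h2 : i < l.length := lt_of_lt_of_le hi (by simp [List.length_take])
  rw [← hx, List.getElem_take]
  exact h i h1 h2

theorem all_take_false (l : List Char) (n p : Nat) (hp : p < l.length) (hpn : p < n)
    (hill : legalVarChar l[p] = false) : (l.take n).all legalVarChar = false := by
  have hlen : p < (l.take n).length := by simp [hpn, hp]
  have hmem : l[p] ∈ l.take n := by
    have : (l.take n)[p] = l[p] := List.getElem_take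
    exact this ▸ (l.take n).getElem_mem hlen
  rw [List.all_eq_false]
  exact ⟨l[p], hmem, by simp [hill]⟩

theorem take_cons_isEmpty (c : Char) (l : List Char) (n : Nat) (h : 1 ≤ n) :
    ((c :: l).take n).isEmpty = false := by
  cases n with
  | zero => omega
  | succ m => simp [List.take_succ_cons]

theorem isAssignLoopA_none (l : List Char) (i : Nat)
    (h : l.findIdx? (fun ch => !legalVarChar ch) = none) : isAssignLoopA l i = none := by
  rw [isAssignLoopA_eq, h]

theorem isAssignLoopA_some (l : List Char) (i e : Nat)
    (h : l.findIdx? (fun ch => !legalVarChar ch) = some e) :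
    isAssignLoopA l i =
      (if l.getD e ' ' = '=' then some ((i : Int) + e)
       else if l.getD e ' ' = '+' ∧ e + 1 < l.length ∧ l.getD (e + 1) ' ' = '=' then some ((i : Int) + e + 1)
       else some 0) := by
  rw [isAssignLoopA_eq, h]

-- A and B in fact agree on every NONEMPTY string: where Python returns False, both ports carry
-- the same 'some 0' placeholder, so equality needs only value ≠ ''.
theorem is_assignment_py_agree : ∀ (value : String) (iscompassign : Bool), value.toList ≠ [] → is_assignment_py value iscompassign = is_assignment_py_alt value iscompassign := by
  intro value iscompassign hpre
  unfold is_assignment_py is_assignment_py_alt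
  cases hL : value.toList with
  | nil => exact absurd hL hpre
  | cons c rest =>
    have hget : PySem.Str.pyGet? value 0 = some c := by
      simp [hL]
    rw [hget]
    by_cases hcLeg : legalVarChar c = true
    · have hguard : (!(PySem.Chars.isalpha c || c == '_')) = false := by
        unfold legalVarChar at hcLeg; simp [hcLeg]
      have hguard' : (!legalVarChar c) = false := by simp [hcLeg]
      simp only [hguard, hguard', Bool.false_eq_true, if_false]
      have hfind : PySem.Str.find value "=" =
          (match (c :: rest).findIdx? (fun ch => ch == '=') with
           | none => (-1 : Int) | some i => (i : Int)) := by
        rw [PySem.Str.find_eq, hL, show ("=" : String).toList = ['='] from rfl, find_eq_eq]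
      have hrepAll : ∀ (s : String),
          PySem.Str.strIsalpha (PySem.Str.replace s "_" "a") =
            (!s.toList.isEmpty && s.toList.all legalVarChar) := by
        intro s
        rw [PySem.Str.strIsalpha_eq, PySem.Str.toList_replace,
          show ("_" : String).toList = ['_'] from rfl, show ("a" : String).toList = ['a'] from rfl,
          strIsalpha_replace]
      cases hfd : value.toList.findIdx? (fun ch => !legalVarChar ch) with
      | none =>
        rw [hL] at hfd
        rw [isAssignLoopA_none _ _ hfd]
        have hall : ∀ x ∈ c :: rest, legalVarChar x = true := by
          intro x hx
          have := List.findIdx?_eq_none_iff.mp hfd x hx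
          simpa using this
        have hfd2 : (c :: rest).findIdx? (fun ch => ch == '=') = none := by
          rw [List.findIdx?_eq_none_iff]
          intro x hx
          have hx' := hall x hx
          simp only [beq_eq_false_iff_ne, ne_eq]
          rintro rfl
          exact absurd hx' (by decide)
        simp only [hfind, hfd2, if_true, hrepAll, hL]
        simp [List.all_eq_true.mpr hall]
      | some p =>
        rw [hL] at hfd
        rw [isAssignLoopA_some _ 0 _ hfd]
        obtain ⟨hplen, hpill, hpmin⟩ := List.findIdx?_eq_some_iff_getElem.mp hfd
        have hpill' : legalVarChar (c :: rest)[p] = false := by simpa using hpill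
        have hpleg : ∀ j (h1 : j < p) (h2 : j < (c :: rest).length), legalVarChar ((c :: rest)[j]'h2) = true := by
          intro j hj hj'
          have := hpmin j hj
          simpa using this
        have hp1 : 1 ≤ p := by
          rcases Nat.eq_zero_or_pos p with h0 | h0
          · subst h0
            simp only [List.getElem_cons_zero] at hpill'
            rw [hcLeg] at hpill'; cases hpill'
          · exact h0
        have hgetDp : (c :: rest).getD p ' ' = (c :: rest)[p] := by
          rw [List.getD_eq_getElem?_getD, List.getElem?_eq_getElem hplen]; rfl
        -- closed form for B when the first '=' sits at a position e ≥ 1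
        have hBsome : ∀ (e : Nat), (c :: rest).findIdx? (fun ch => ch == '=') = some e → 1 ≤ e →
            e - 1 < (c :: rest).length →
            (if PySem.Str.find value "=" = -1 then
               if PySem.Str.strIsalpha (PySem.Str.replace value "_" "a") then none else some 0
             else
               if PySem.Str.strIsalpha (PySem.Str.replace
                   (if PySem.Str.pyGet? value (PySem.Str.find value "=" - 1) = some '+' then
                      PySem.Str.slice value none (some (PySem.Str.find value "=" - 1))
                    else PySem.Str.slice value none (some (PySem.Str.find value "=")))
                   "_" "a") then some (PySem.Str.find value "=") else some 0) =
            (if (c :: rest).getD (e-1) ' ' = '+' then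
               (if !((c :: rest).take (e-1)).isEmpty && ((c :: rest).take (e-1)).all legalVarChar
                then some ((e : Nat) : Int) else some 0)
             else
               (if !((c :: rest).take e).isEmpty && ((c :: rest).take e).all legalVarChar
                then some ((e : Nat) : Int) else some 0)) := by
          intro e hfd2 he1 hel
          simp only [hfind, hfd2]
          rw [if_neg (by omega : ¬ ((e : Nat) : Int) = -1)]
          have hgm1 : PySem.Str.pyGet? value (((e : Nat) : Int) - 1) = some ((c :: rest)[e-1]) := by
            rw [show ((e : Nat) : Int) - 1 = ((e - 1 : Nat) : Int) by omega,
              PySem.Str.pyGet?_natCast, hL, List.getElem?_eq_getElem hel]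
          have hgd : (c :: rest).getD (e-1) ' ' = (c :: rest)[e-1] := by
            rw [List.getD_eq_getElem?_getD, List.getElem?_eq_getElem hel]; rfl
          have hsl : ∀ (X : Int), 0 ≤ X →
              PySem.Str.strIsalpha (PySem.Str.replace (PySem.Str.slice value none (some X)) "_" "a") =
                (!((c :: rest).take X.toNat).isEmpty && ((c :: rest).take X.toNat).all legalVarChar) := by
            intro X hX
            rw [hrepAll, PySem.Str.toList_slice, PySem.Chars.slice_eq_listSlice, hL,
              PySem.List.slice_to _ hX]
          rw [hgd]
          by_cases hplus : (c :: rest)[e-1] = '+'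
          · rw [hgm1, hplus, if_pos rfl, if_pos rfl,
              hsl (((e : Nat) : Int) - 1) (by omega),
              show ((((e : Nat) : Int)) - 1).toNat = e - 1 by omega]
          · rw [hgm1,
              if_neg (show ¬ (some ((c :: rest)[e-1]'hel) = some '+') by simpa using hplus),
              if_neg hplus,
              hsl ((e : Nat) : Int) (by omega),
              show (((e : Nat) : Int)).toNat = e by omega]
        have hEqNe : ∀ j (h1 : j < p) (h2 : j < (c :: rest).length), ¬ ((((c :: rest)[j]'h2) == '=') = true) := by
          intro j hj hj'
          have := hpleg j hj hj'
          simp only [beq_iff_eq]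
          intro h
          rw [h] at this
          exact absurd this (by decide)
        by_cases hE : (c :: rest)[p] = '='
        · -- A returns p: the first '=' is at p, name = take p, all legal
          have hfd2 : (c :: rest).findIdx? (fun ch => ch == '=') = some p :=
            List.findIdx?_eq_some_iff_getElem.mpr
              ⟨hplen, by simp [hE], fun j hj => hEqNe j hj (lt_trans hj hplen)⟩
          rw [hBsome p hfd2 hp1 (by omega)]
          have hgd1 : (c :: rest).getD (p-1) ' ' = (c :: rest)[p-1]'(by omega) := by
            rw [List.getD_eq_getElem?_getD, List.getElem?_eq_getElem (by omega : p - 1 < (c :: rest).length)]; rfl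
          have hleg1 : legalVarChar ((c :: rest)[p-1]'(by omega)) = true := hpleg (p-1) (by omega) (by omega)
          rw [hgd1,
            if_neg (show ¬ (c :: rest)[p-1]'(by omega) = '+' by
              intro h; rw [h] at hleg1; exact absurd hleg1 (by decide)),
            if_pos (show (!((c :: rest).take p).isEmpty && ((c :: rest).take p).all legalVarChar) = true by
              rw [Bool.and_eq_true, take_cons_isEmpty c rest p hp1]
              exact ⟨rfl, all_take_true _ _ hpleg⟩),
            if_pos (show (c :: rest).getD p ' ' = '=' by rw [hgetDp]; exact hE)]
          norm_num
        · by_cases hPl : (c :: rest).getD p ' ' = '+' ∧ p + 1 < (c :: rest).length ∧ (c :: rest).getD (p+1) ' ' = '='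
          · -- A returns p+1 on '+=': the first '=' is at p+1, name = take p
            obtain ⟨hplusP, hlt, hq⟩ := hPl
            have hplusP' : (c :: rest)[p] = '+' := by rw [← hgetDp]; exact hplusP
            have hq' : (c :: rest)[p+1] = '=' := by
              rw [List.getD_eq_getElem?_getD, List.getElem?_eq_getElem hlt] at hq; exact hq
            have hfd2 : (c :: rest).findIdx? (fun ch => ch == '=') = some (p+1) :=
              List.findIdx?_eq_some_iff_getElem.mpr
                ⟨hlt, by simp [hq'], by
                  intro j hj
                  rcases Nat.lt_succ_iff_lt_or_eq.mp hj with hj' | hj'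
                  · exact hEqNe j hj' (lt_trans hj' hplen)
                  · subst hj'
                    simp only [beq_iff_eq]
                    intro h
                    rw [h] at hplusP'
                    cases hplusP'⟩
            rw [hBsome (p+1) hfd2 (by omega) (by omega)]
            have hgd1 : (c :: rest).getD (p+1-1) ' ' = (c :: rest)[p] := by
              rw [show p + 1 - 1 = p from rfl, List.getD_eq_getElem?_getD, List.getElem?_eq_getElem hplen]; rfl
            rw [hgd1, if_pos hplusP',
              if_pos (show (!((c :: rest).take (p+1-1)).isEmpty && ((c :: rest).take (p+1-1)).all legalVarChar) = true by
                rw [Bool.and_eq_true, take_cons_isEmpty c rest (p+1-1) (by omega)]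
                exact ⟨rfl, all_take_true _ _ (fun j h1 h2 => hpleg j (by omega) h2)⟩),
              if_neg (show ¬ (c :: rest).getD p ' ' = '=' by rw [hgetDp]; exact hE),
              if_pos ⟨hplusP, hlt, hq⟩]
            norm_num
          · -- A returns False (ported some 0): B's name always contains the illegal character at p
            have hAside : (if (c :: rest).getD p ' ' = '=' then some (((0:Nat) : Int) + (p : Int))
                else if (c :: rest).getD p ' ' = '+' ∧ p + 1 < (c :: rest).length ∧ (c :: rest).getD (p + 1) ' ' = '=' then some (((0:Nat) : Int) + (p : Int) + 1)
                else some 0) = some 0 := by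
              rw [if_neg (show ¬ (c :: rest).getD p ' ' = '=' by rw [hgetDp]; exact hE), if_neg hPl]
            rw [hAside]
            have hallF : (c :: rest).all legalVarChar = false := by
              rw [List.all_eq_false]
              exact ⟨(c :: rest)[p], List.getElem_mem hplen, by simp [hpill']⟩
            cases hfd2 : (c :: rest).findIdx? (fun ch => ch == '=') with
            | none =>
              simp only [hfind, hfd2, if_true, hrepAll, hL, hallF]
              simp
            | some e =>
              obtain ⟨helen, hee, hemin⟩ := List.findIdx?_eq_some_iff_getElem.mp hfd2
              have hee' : (c :: rest)[e] = '=' := by simpa using hee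
              have hpe : p < e := by
                rcases Nat.lt_trichotomy p e with h | h | h
                · exact h
                · exact absurd (h ▸ hee') hE
                · have hle := hpleg e h helen
                  rw [hee'] at hle
                  exact absurd hle (by decide)
              rw [hBsome e hfd2 (by omega) (by omega)]
              have hgd1 : (c :: rest).getD (e-1) ' ' = (c :: rest)[e-1]'(by omega) := by
                rw [List.getD_eq_getElem?_getD, List.getElem?_eq_getElem (by omega : e - 1 < (c :: rest).length)]; rfl
              by_cases hplus : (c :: rest).getD (e-1) ' ' = '+'
              · have hpe1 : p < e - 1 := by
                  rcases Nat.lt_or_ge p (e-1) with h | h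
                  · exact h
                  · exfalso
                    apply hPl
                    have hpe1' : p = e - 1 := by omega
                    refine ⟨by rw [hpe1']; exact hplus, by omega, ?_⟩
                    rw [show p + 1 = e by omega, List.getD_eq_getElem?_getD,
                      List.getElem?_eq_getElem helen]
                    simpa using hee'
                rw [if_pos hplus,
                  if_neg (by simp [all_take_false (c :: rest) (e-1) p hplen hpe1 hpill'])]
              · rw [if_neg hplus,
                  if_neg (by simp [all_take_false (c :: rest) e p hplen hpe hpill'])]
    · have hcLeg' : legalVarChar c = false := by simpa using hcLeg
      have hguard : (!(PySem.Chars.isalpha c || c == '_')) = true := by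
        unfold legalVarChar at hcLeg'; simp [hcLeg']
      simp [hguard, hcLeg']

-- ===== VERDICT (by name: the statement is the Claim_ definition above) =====
theorem is_assignment_py_spec : Claim_equal_is_assignment_py :=
  fun value iscompassign _dom hpre => is_assignment_py_agree value iscompassign hpre.1
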